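/-
  fixed/jsmn_s.bin (-DJSMN_STRICT -DJSMN_PARENT_LINKS): THE CLOSED STATEMENTS OF THE FIXED IMAGE — no hypothesis left but the contracts' own LAYOUT preconditions.
      alloc / fill / prim / str              the original image's proofs under the fixed image's names (same bytes at the same addresses): Fixed/S/{Alloc,Prim,Str}.lean
      jsmn_parse_core                        `core_closed : CoreSpec binFSc n` — the composition (Fixed/S/Parse.lean) from the case regions
                                             (Fixed/S/ParseOpen, ParseStr, ParsePrim, ParseClose, ParseComma, ParseFinal); the callee contracts cross to the
                                             image's inside view `binFSc` through the `.view` lemmas of Fixed/Specs.lean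
      THE NEW jsmn_parse                     **`parse_fixed_closed : ParseSpecFixed binFS n`** = Fixed/S/ParseCheck.lean on top of `core_closed`:
                                             for EVERY content of the parser struct and of the token array (of `num_tokens` entries) the machine code
                                             returns `Jsmn.parseFixed`'s answer, with the model's parser state and tokens in memory, the callee-saved
                                             registers restored, and nothing changed outside its 104-byte stack window, the parser struct and the
                                             token array. NO `Inv`, no fuel (`Jsmn.parseFixed_total`: the model always answers).
      jsmn_init, jsmn_run, jsmn_main         `run_fixed_closed`, `main_fixed_closed` (moved code: Fixed/S/{Init,Run,Main}.lean)
-/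
import Prog.Jsmn.Fixed.S.Alloc
import Prog.Jsmn.Fixed.S.Prim
import Prog.Jsmn.Fixed.S.Str
import Prog.Jsmn.Fixed.S.Parse
import Prog.Jsmn.Fixed.S.ParseOpen
import Prog.Jsmn.Fixed.S.ParseStr
import Prog.Jsmn.Fixed.S.ParsePrim
import Prog.Jsmn.Fixed.S.ParseClose
import Prog.Jsmn.Fixed.S.ParseComma
import Prog.Jsmn.Fixed.S.ParseFinal
import Prog.Jsmn.Fixed.S.ParseCheck
import Prog.Jsmn.Fixed.S.Init
import Prog.Jsmn.Fixed.S.Run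
import Prog.Jsmn.Fixed.S.Main
import Json.Jsmn.Safe

namespace X86
namespace J6
namespace FS
open X86.User (CodeAt RegsKept Span FlagsOK Layout toNat_add_ofNat toNat_ofNat_lt' add_ofNat_add)
open Jsmn

/-- jsmn_parse_primitive of fixed/jsmn_s.bin computes `Jsmn.parsePrimitive`. -/
theorem prim_closed (n : User.Layout) : PrimSpec binFS n := prim_spec (alloc_spec n) (fill_spec n)
/-- jsmn_parse_string of fixed/jsmn_s.bin computes `Jsmn.parseString`. -/
theorem str_closed (n : User.Layout) : StrSpec binFS n := str_spec (alloc_spec n) (fill_spec n)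

/-- **jsmn_parse_core of fixed/jsmn_s.bin (the original body, unchanged) computes `Jsmn.parseFuel`** under `Inv`. -/
theorem core_closed (n : User.Layout) : CoreSpec binFSc n :=
  have sf := Jsmn.safeFacts binFSc.cfg
  parse_spec sf (open_spec sf ((alloc_spec n).view sameCallees_s)) (string_spec sf ((str_closed n).view sameCallees_s))
    (primitive_spec sf ((prim_closed n).view sameCallees_s)) (close_spec sf n) (comma_spec sf n) (final_spec n)

/-- **THE FIXED jsmn_parse of fixed/jsmn_s.bin computes `Jsmn.parseFixed`** — with no precondition on the parser's fields or the tokens' content. -/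
theorem parse_fixed_closed (n : User.Layout) : ParseSpecFixed binFS n := parse_fixed_spec (core_closed n)

/-- jsmn_run of fixed/jsmn_s.bin: jsmn_init, then the fixed jsmn_parse. -/
theorem run_fixed_closed (n : User.Layout) : RunSpecFixed binFS n := run_spec (init_spec n) (parse_fixed_closed n)

/-- jsmn_main of fixed/jsmn_s.bin leaves `encodeResult r tokens` at `out` and returns its length. -/
theorem main_fixed_closed (n : User.Layout) : MainSpecFixed binFS n := main_spec (run_fixed_closed n)

end FS
end J6
end X86

#print axioms X86.J6.FS.parse_fixed_closed
#print axioms X86.J6.FS.main_fixed_closed
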